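-- pv_equiv track=rewrite | github.com/tamlinlove/kuricomposition | kuri_composition/camera.py | get_all_state_coords
-- ===== SOURCE A (Python) =====
-- def get_all_state_coords(top_left,bottom_right):
--     X_OFFSET = top_left[0]
--     Y_OFFSET = top_left[1]
--     X_INTERVAL = (bottom_right[0]-top_left[0])//9
--     Y_INTERVAL = (bottom_right[1]-top_left[1])//9
--
--     cols = []
--     centre_coords = [(2,7),(7,2),(2,2),(7,7)]
--
--     points = []
--     for i in range(10):
--         point_row = []
--         for j in range(10):
--             point_row.append((X_OFFSET+i*X_INTERVAL,Y_OFFSET+j*Y_INTERVAL))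
--             if (i,j) in centre_coords:
--                 cols.append((255,0,0))
--             else:
--                 cols.append((0,0,255))
--         points.append(point_row)
--     return points,cols
-- ===== SOURCE B (Python) =====
-- def get_all_state_coords(top_left, bottom_right):
--     x0, y0 = top_left
--     dx = (bottom_right[0] - top_left[0]) // 9
--     dy = (bottom_right[1] - top_left[1]) // 9
--     points = [[(x0 + i * dx, y0 + j * dy) for j in range(10)] for i in range(10)]
--     cols = [(0, 0, 255)] * 100
--     for ci, cj in [(2, 7), (7, 2), (2, 2), (7, 7)]:
--         cols[ci * 10 + cj] = (255, 0, 0)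
--     return points, cols
-- ===== Notes on version B (the rewrite author's own statement) =====
-- stated objective: alternative
-- what changed: B splits A's single fused nested loop into two independent passes: a comprehension builds the points grid, and the colour list is built as 100 blue entries with the four red centres patched in by flattened index (i*10+j), eliminating the per-cell membership test.
import Mathlib
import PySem

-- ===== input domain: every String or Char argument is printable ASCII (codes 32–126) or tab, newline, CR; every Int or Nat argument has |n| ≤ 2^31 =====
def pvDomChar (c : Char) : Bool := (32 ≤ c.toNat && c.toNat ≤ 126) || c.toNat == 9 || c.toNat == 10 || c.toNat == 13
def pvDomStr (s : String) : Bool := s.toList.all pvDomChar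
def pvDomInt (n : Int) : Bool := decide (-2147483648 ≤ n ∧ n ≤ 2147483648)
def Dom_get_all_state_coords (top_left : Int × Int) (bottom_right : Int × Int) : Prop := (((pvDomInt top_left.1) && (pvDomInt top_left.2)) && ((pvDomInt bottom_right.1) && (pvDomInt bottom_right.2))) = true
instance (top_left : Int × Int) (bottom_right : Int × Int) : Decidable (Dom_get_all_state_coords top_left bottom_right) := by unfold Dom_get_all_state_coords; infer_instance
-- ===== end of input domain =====

-- B builds the points grid and the colour list in two separate passes (blue base list patched
-- at the four flattened centre indices) instead of A's fused nested loop with a membership test.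

-- ===== PORT A =====
def get_all_state_coords (top_left : Int × Int) (bottom_right : Int × Int) : (List (List (Int × Int))) × (List (Int × Int × Int)) :=
  let X_OFFSET := top_left.1
  let Y_OFFSET := top_left.2
  let X_INTERVAL := PySem.Int.floordiv (bottom_right.1 - top_left.1) 9
  let Y_INTERVAL := PySem.Int.floordiv (bottom_right.2 - top_left.2) 9
  let centre_coords : List (Int × Int) := [(2,7),(7,2),(2,2),(7,7)]
  let st :=
    (PySem.List.pyRange 0 10 1).foldl (fun (st : (List (List (Int × Int))) × (List (Int × Int × Int))) i =>
      let inner :=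
        (PySem.List.pyRange 0 10 1).foldl (fun (st2 : (List (Int × Int)) × (List (Int × Int × Int))) j =>
          let point_row := st2.1 ++ [(X_OFFSET + i * X_INTERVAL, Y_OFFSET + j * Y_INTERVAL)]
          let cols := if (i, j) ∈ centre_coords then st2.2 ++ [((255 : Int), (0 : Int), (0 : Int))]
                      else st2.2 ++ [((0 : Int), (0 : Int), (255 : Int))]
          (point_row, cols)) ([], st.2)
      (st.1 ++ [inner.1], inner.2)) ([], [])
  (st.1, st.2)

-- ===== PORT B =====
def get_all_state_coords_alt (top_left : Int × Int) (bottom_right : Int × Int) : (List (List (Int × Int))) × (List (Int × Int × Int)) :=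
  let x0 := top_left.1
  let y0 := top_left.2
  let dx := PySem.Int.floordiv (bottom_right.1 - top_left.1) 9
  let dy := PySem.Int.floordiv (bottom_right.2 - top_left.2) 9
  let points := (PySem.List.pyRange 0 10 1).map (fun i =>
    (PySem.List.pyRange 0 10 1).map (fun j => (x0 + i * dx, y0 + j * dy)))
  let cols :=
    ([((2:Nat),(7:Nat)),(7,2),(2,2),(7,7)]).foldl
      (fun (cs : List (Int × Int × Int)) c => cs.set (c.1 * 10 + c.2) ((255 : Int), (0 : Int), (0 : Int)))
      (List.replicate 100 ((0 : Int), (0 : Int), (255 : Int)))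
  (points, cols)

-- ===== PRECONDITION & SPEC =====
def Spec_get_all_state_coords (top_left : Int × Int) (bottom_right : Int × Int) (out : (List (List (Int × Int))) × (List (Int × Int × Int))) : Prop := out = get_all_state_coords_alt top_left bottom_right
instance (top_left : Int × Int) (bottom_right : Int × Int) (out : (List (List (Int × Int))) × (List (Int × Int × Int))) : Decidable (Spec_get_all_state_coords top_left bottom_right out) := by unfold Spec_get_all_state_coords; infer_instance

-- ===== CLAIM (what is proved, stated in full; the proofs are below) =====
def Claim_equal_get_all_state_coords : Prop := ∀ (top_left : Int × Int) (bottom_right : Int × Int), Dom_get_all_state_coords top_left bottom_right → Spec_get_all_state_coords top_left bottom_right (get_all_state_coords top_left bottom_right)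

-- ===== LEMMAS AND PROOFS =====

-- Inner loop of A splits into a points part (a map) and a cols part (an independent fold).
theorem pv_inner_split (x0 y0 dx dy i : Int) (C : List (Int × Int))
    (l : List Int) (r : List (Int × Int)) (cs : List (Int × Int × Int)) :
    l.foldl (fun (st2 : (List (Int × Int)) × (List (Int × Int × Int))) j =>
        let point_row := st2.1 ++ [(x0 + i * dx, y0 + j * dy)]
        let cols := if (i, j) ∈ C then st2.2 ++ [((255 : Int), (0 : Int), (0 : Int))]
                    else st2.2 ++ [((0 : Int), (0 : Int), (255 : Int))]
        (point_row, cols)) (r, cs)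
    = (r ++ l.map (fun j => (x0 + i * dx, y0 + j * dy)),
       l.foldl (fun cs2 j => if (i, j) ∈ C then cs2 ++ [((255 : Int), (0 : Int), (0 : Int))]
                             else cs2 ++ [((0 : Int), (0 : Int), (255 : Int))]) cs) := by
  induction l generalizing r cs with
  | nil => simp
  | cons h t ih => simp [List.foldl_cons, ih]

-- The outer loop, with the inner loop already split, also splits into a points map
-- and an independent cols fold.
theorem pv_outer_split (x0 y0 dx dy : Int) (C : List (Int × Int))
    (l : List Int) (ps : List (List (Int × Int))) (cs : List (Int × Int × Int)) :
    l.foldl (fun (st : (List (List (Int × Int))) × (List (Int × Int × Int))) i =>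
        (st.1 ++ [(PySem.List.pyRange 0 10 1).map (fun j => (x0 + i * dx, y0 + j * dy))],
         (PySem.List.pyRange 0 10 1).foldl (fun cs2 j =>
           if (i, j) ∈ C then cs2 ++ [((255 : Int), (0 : Int), (0 : Int))]
           else cs2 ++ [((0 : Int), (0 : Int), (255 : Int))]) st.2)) (ps, cs)
    = (ps ++ l.map (fun i => (PySem.List.pyRange 0 10 1).map (fun j => (x0 + i * dx, y0 + j * dy))),
       l.foldl (fun cs2 i =>
         (PySem.List.pyRange 0 10 1).foldl (fun cs3 j =>
           if (i, j) ∈ C then cs3 ++ [((255 : Int), (0 : Int), (0 : Int))]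
           else cs3 ++ [((0 : Int), (0 : Int), (255 : Int))]) cs2) cs) := by
  induction l generalizing ps cs with
  | nil => simp
  | cons h t ih => simp [List.foldl_cons, ih]

-- The colour lists of both programs are closed terms; they are equal by evaluation.
set_option maxRecDepth 40000 in
theorem pv_cols_eq :
    (PySem.List.pyRange 0 10 1).foldl (fun cs2 i =>
        (PySem.List.pyRange 0 10 1).foldl (fun cs3 j =>
          if (i, j) ∈ ([(2,7),(7,2),(2,2),(7,7)] : List (Int × Int)) then cs3 ++ [((255 : Int), (0 : Int), (0 : Int))]
          else cs3 ++ [((0 : Int), (0 : Int), (255 : Int))]) cs2) []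
    = ([((2:Nat),(7:Nat)),(7,2),(2,2),(7,7)]).foldl
        (fun (cs : List (Int × Int × Int)) c => cs.set (c.1 * 10 + c.2) ((255 : Int), (0 : Int), (0 : Int)))
        (List.replicate 100 ((0 : Int), (0 : Int), (255 : Int))) := by
  decide

-- ===== VERDICT (by name: the statement is the Claim_ definition above) =====
set_option maxRecDepth 4000 in
theorem get_all_state_coords_spec : Claim_equal_get_all_state_coords := by
  intro tl br _
  show get_all_state_coords tl br = get_all_state_coords_alt tl br
  simp only [get_all_state_coords, get_all_state_coords_alt, pv_inner_split, List.nil_append]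
  rw [pv_outer_split, pv_cols_eq]
  simp
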